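-- pv_equiv track=rewrite | github.com/kftlfd/leetcode | 2024/07/896-1509-MinDiffBetweenLargestAndSmallestValuesInThreeMoves.py | minDifference
-- ===== SOURCE A (Python) =====
-- from typing import List
-- from heapq import heappush, heappushpop, heappop, nlargest, nsmallest
--
-- def minDifference(nums: List[int]) -> int:
--     nums_size = len(nums)
--     if nums_size <= 4:
--         return 0
--
--     # Find the four smallest elements
--     smallest_four = sorted(nsmallest(4, nums))
--
--     # Find the four largest elements
--     largest_four = sorted(nlargest(4, nums))
--
--     min_diff = float("inf")
--     # Four scenarios to compute the minimum difference
--     for i in range(4):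
--         min_diff = min(min_diff, largest_four[i] - smallest_four[i])
--
--     return min_diff
-- ===== SOURCE B (Python) =====
-- def minDifference(nums):
--     n = len(nums)
--     if n <= 4:
--         return 0
--     s = sorted(nums)
--     return min(hi - lo for lo, hi in zip(s[:4], s[n - 4:]))
-- ===== Notes on version B (the rewrite author's own statement) =====
-- stated objective: simpler
-- what changed: Replaces the two heap-based partial selections (nsmallest/nlargest, each re-sorted) and the indexed 4-iteration min loop by a single full sort, boundary slices zipped together, and min over the four pairwise differences.
import Mathlib
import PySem

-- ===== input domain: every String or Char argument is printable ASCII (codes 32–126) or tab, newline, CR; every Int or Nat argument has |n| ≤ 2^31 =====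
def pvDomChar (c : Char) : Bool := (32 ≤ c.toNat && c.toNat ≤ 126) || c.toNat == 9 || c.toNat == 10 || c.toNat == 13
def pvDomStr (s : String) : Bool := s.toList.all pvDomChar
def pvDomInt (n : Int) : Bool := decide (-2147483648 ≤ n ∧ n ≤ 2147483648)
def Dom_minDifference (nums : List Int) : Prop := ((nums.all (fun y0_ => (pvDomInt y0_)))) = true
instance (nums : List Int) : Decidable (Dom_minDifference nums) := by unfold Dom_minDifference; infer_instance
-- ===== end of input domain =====

-- B replaces A's heap-based nsmallest/nlargest partial selections (each re-sorted) and indexed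
-- 4-step min loop by one full sort, boundary slices zipped together and min over the differences.

-- ===== PORT A =====
-- nsmallest(4, nums) = sorted(nums)[:4]; nlargest(4, nums) = sorted(nums, reverse=True)[:4]
-- (heapq's documented contract; ties are between equal Ints, so the value is exact).
def minDifference (nums : List Int) : Int :=
  let nums_size := nums.length
  if nums_size ≤ 4 then 0
  else
    let smallest_four :=
      PySem.List.sorted ((PySem.List.sorted nums (fun x => x) false).take 4) (fun x => x) false
    let largest_four :=
      PySem.List.sorted ((PySem.List.sorted nums (fun x => x) true).take 4) (fun x => x) false
    -- min_diff starts as float('inf'): modelled as Option Int none, min(inf, d) = d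
    let min_diff : Option Int :=
      (PySem.List.pyRange 0 4 1).foldl
        (fun acc i =>
          let d := PySem.List.pyGetD largest_four i 0 - PySem.List.pyGetD smallest_four i 0
          match acc with
          | none => some d
          | some m => some (min m d)) none
    min_diff.getD 0

-- ===== PORT B =====
def minDifference_alt (nums : List Int) : Int :=
  let n := nums.length
  if n ≤ 4 then 0
  else
    let s := PySem.List.sorted nums (fun x => x) false
    let diffs := ((s.take 4).zip (s.drop (n - 4))).map (fun p => p.2 - p.1)
    (PySem.List.min? diffs (fun x => x)).getD 0

-- ===== PRECONDITION & SPEC =====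
def Spec_minDifference (nums : List Int) (out : Int) : Prop := out = minDifference_alt nums
instance (nums : List Int) (out : Int) : Decidable (Spec_minDifference nums out) := by unfold Spec_minDifference; infer_instance

-- ===== CLAIM (what is proved, stated in full; the proofs are below) =====
def Claim_equal_minDifference : Prop := ∀ (nums : List Int), Dom_minDifference nums → Spec_minDifference nums (minDifference nums)

-- ===== LEMMAS AND PROOFS =====

-- Python's min(m, d) as the branch test writes it
theorem pv_step (m d : Int) : (if d < m then some d else some m) = some (min m d) := by
  rw [min_def]; split_ifs <;> first | rfl | omega

-- a list of length 4 is a 4-element literal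
theorem pv_len4 {α : Type} (l : List α) (h : l.length = 4) :
    ∃ a b c d, l = [a, b, c, d] := by
  match l, h with
  | [a, b, c, d], _ => exact ⟨a, b, c, d, rfl⟩

-- Python's sorted(nums, reverse=True) on Ints is the reverse of sorted(nums)
theorem pv_sorted_rev_eq_reverse (nums : List Int) :
    PySem.List.sorted nums (fun x => x) true = (PySem.List.sorted nums (fun x => x) false).reverse := by
  have hperm : List.Perm (PySem.List.sorted nums (fun x => x) true)
      (PySem.List.sorted nums (fun x => x) false).reverse :=
    (PySem.List.sorted_perm nums (fun x => x) true).trans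
      ((List.reverse_perm _).trans (PySem.List.sorted_perm nums (fun x => x) false)).symm
  refine hperm.eq_of_pairwise (le := fun a b : Int => b ≤ a) ?_ ?_ ?_
  · exact fun a b _ _ h1 h2 => le_antisymm h2 h1
  · exact PySem.List.sorted_pairwise_rev nums (fun x => x)
  · exact (List.pairwise_reverse).mpr (PySem.List.sorted_pairwise nums (fun x => x))

-- ===== VERDICT (by name: the statement is the Claim_ definition above) =====
theorem minDifference_spec : Claim_equal_minDifference := by
  unfold Claim_equal_minDifference
  intro nums _
  unfold Spec_minDifference minDifference minDifference_alt
  by_cases hle : nums.length ≤ 4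
  · simp [hle]
  · simp only [hle, if_false]
    set s := PySem.List.sorted nums (fun x => x) false with hs
    have hslen : s.length = nums.length := PySem.List.length_sorted nums (fun x => x) false
    have hspair : s.Pairwise (fun a b => a ≤ b) := PySem.List.sorted_pairwise nums (fun x => x)
    have hn5 : 5 ≤ nums.length := by omega
    -- smallest_four = s.take 4
    have hsm : PySem.List.sorted (s.take 4) (fun x => x) false = s.take 4 :=
      PySem.List.sorted_eq_self_of_pairwise _ _ (hspair.sublist (List.take_sublist 4 s))
    -- largest_four = s.drop (n - 4)
    have hrev : PySem.List.sorted nums (fun x => x) true = s.reverse := pv_sorted_rev_eq_reverse nums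
    have htk : (s.reverse).take 4 = (s.drop (s.length - 4)).reverse := List.take_reverse
    rw [hslen] at htk
    have hdpair : (s.drop (nums.length - 4)).Pairwise (fun a b : Int => a ≤ b) :=
      hspair.sublist (List.drop_sublist _ s)
    have hlg : PySem.List.sorted ((PySem.List.sorted nums (fun x => x) true).take 4) (fun x => x) false
        = s.drop (nums.length - 4) := by
      rw [hrev, htk]
      apply PySem.List.sorted_id_eq_of_perm_of_pairwise
      · exact (List.reverse_perm _).symm
      · exact hdpair
    rw [hsm, hlg]
    -- both slices have exactly 4 elements
    have hlt : (s.take 4).length = 4 := by simp [hslen]; omega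
    have hld : (s.drop (nums.length - 4)).length = 4 := by simp [hslen]; omega
    obtain ⟨a0, a1, a2, a3, ha⟩ := pv_len4 _ hlt
    obtain ⟨b0, b1, b2, b3, hb⟩ := pv_len4 _ hld
    rw [ha, hb]
    have hr : PySem.List.pyRange 0 4 1 = [0, 1, 2, 3] := rfl
    rw [hr]
    simp [PySem.List.pyGetD, PySem.List.pyGet?, PySem.List.pyIdx?,
      PySem.List.min?, List.zip, List.zipWith, List.foldl, pv_step, min_assoc]
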